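-- pv_equiv track=rewrite | github.com/JF-Athayde/OBI | 2020/atlanta2020PJF3.py | retangulizar
-- ===== SOURCE A (Python) =====
-- def retangulizar(azul, branco):
--     A = azul+branco
--
--     for l in range(1, A): # Azul = 2L + 2C - 4
--         if A % l == 0:
--             c = int(A/l)
--             if 2*l + 2*c - 4 == azul and l*c-2*l-2*c+4 == branco:
--                 return min(c, l), max(l, c)
--
--     return -1, -1
-- ===== SOURCE B (Python) =====
-- def _isqrt(n):
--     # binary-search integer square root (no math import, matching A's imports)
--     lo, hi = 0, n
--     while lo < hi:
--         mid = (lo + hi + 1) // 2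
--         if mid * mid <= n:
--             lo = mid
--         else:
--             hi = mid - 1
--     return lo
--
--
-- def retangulizar(azul, branco):
--     # l + c = (azul + 4) / 2 and l * c = azul + branco: solve the quadratic in O(1).
--     A = azul + branco
--     if A < 2 or (azul + 4) % 2 != 0:
--         return -1, -1
--     s = (azul + 4) // 2
--     disc = s * s - 4 * A
--     if disc < 0:
--         return -1, -1
--     r = _isqrt(disc)
--     if r * r != disc:
--         return -1, -1
--     l = (s - r) // 2
--     if (s - r) % 2 != 0 or l < 1:
--         return -1, -1
--     return l, s - l
-- ===== Notes on version B (the rewrite author's own statement) =====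
-- stated objective: faster
-- what changed: Instead of scanning all candidate side lengths l in range(1, azul+branco) for a divisor pair, B solves the quadratic x^2 - ((azul+4)/2)x + (azul+branco) = 0 with an integer-square-root discriminant test.
import Mathlib
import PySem

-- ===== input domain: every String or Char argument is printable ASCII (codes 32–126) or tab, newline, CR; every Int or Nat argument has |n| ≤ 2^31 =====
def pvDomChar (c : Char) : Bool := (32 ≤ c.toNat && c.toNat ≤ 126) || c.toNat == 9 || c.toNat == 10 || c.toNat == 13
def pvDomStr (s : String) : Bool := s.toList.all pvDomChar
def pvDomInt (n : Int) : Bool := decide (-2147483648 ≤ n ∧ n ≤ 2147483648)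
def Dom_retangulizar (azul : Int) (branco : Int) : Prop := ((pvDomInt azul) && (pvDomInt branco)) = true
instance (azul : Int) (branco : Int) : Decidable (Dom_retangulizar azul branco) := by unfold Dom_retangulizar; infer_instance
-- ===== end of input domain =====

-- B replaces A's O(azul+branco) divisor scan by solving the quadratic x^2 - ((azul+4)/2)x + (azul+branco) = 0 in O(log) time.


-- ===== PORT A =====
-- the for-loop 'for l in range(1, A)' with early return; fuel = number of remaining iterations
def retangoLoop (azul : Int) (branco : Int) (A : Int) : Nat → Int → List Int
  | 0, _ => [-1, -1]
  | fuel+1, l =>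
    if PySem.Int.mod A l = 0 then
      -- int(A/l): equals A // l here because A % l == 0 and |A| ≤ 2^32 < 2^53 keeps the float division exact
      let c := PySem.Int.floordiv A l
      if 2*l + 2*c - 4 = azul ∧ l*c - 2*l - 2*c + 4 = branco then
        [min c l, max l c]
      else retangoLoop azul branco A fuel (l+1)
    else retangoLoop azul branco A fuel (l+1)

def retangulizar (azul : Int) (branco : Int) : List Int :=
  retangoLoop azul branco (azul + branco) ((azul + branco) - 1).toNat 1

-- ===== PORT B =====
-- binary-search integer square root (Source B's _isqrt); fuel bounds the shrinking interval
def isqrtLoop (n : Int) : Nat → Int → Int → Int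
  | 0, lo, _ => lo
  | fuel+1, lo, hi =>
    if lo < hi then
      let mid := PySem.Int.floordiv (lo + hi + 1) 2
      if mid * mid ≤ n then isqrtLoop n fuel mid hi
      else isqrtLoop n fuel lo (mid - 1)
    else lo

def pyIsqrt (n : Int) : Int := isqrtLoop n n.toNat 0 n

def retangulizar_alt (azul : Int) (branco : Int) : List Int :=
  let A := azul + branco
  if A < 2 ∨ PySem.Int.mod (azul + 4) 2 ≠ 0 then [-1, -1]
  else
    let s := PySem.Int.floordiv (azul + 4) 2
    let disc := s * s - 4 * A
    if disc < 0 then [-1, -1]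
    else
      let r := pyIsqrt disc
      if r * r ≠ disc then [-1, -1]
      else
        let l := PySem.Int.floordiv (s - r) 2
        if PySem.Int.mod (s - r) 2 ≠ 0 ∨ l < 1 then [-1, -1]
        else [l, s - l]

-- ===== PRECONDITION & SPEC =====
def Spec_retangulizar (azul : Int) (branco : Int) (out : List Int) : Prop := out = retangulizar_alt azul branco
instance (azul : Int) (branco : Int) (out : List Int) : Decidable (Spec_retangulizar azul branco out) := by unfold Spec_retangulizar; infer_instance

-- ===== CLAIM (what is proved, stated in full; the proofs are below) =====
def Claim_equal_retangulizar : Prop := ∀ (azul : Int) (branco : Int), Dom_retangulizar azul branco → Spec_retangulizar azul branco (retangulizar azul branco)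

-- ===== LEMMAS AND PROOFS =====

-- condition under which A's loop returns at index l
def goodCond (azul : Int) (branco : Int) (A : Int) (l : Int) : Prop :=
  PySem.Int.mod A l = 0 ∧
  2*l + 2*(PySem.Int.floordiv A l) - 4 = azul ∧
  l*(PySem.Int.floordiv A l) - 2*l - 2*(PySem.Int.floordiv A l) + 4 = branco

lemma loop_none (azul branco A : Int) :
    ∀ (fuel : Nat) (l : Int),
      (∀ j, l ≤ j → j < l + fuel → ¬ goodCond azul branco A j) →
      retangoLoop azul branco A fuel l = [-1, -1] := by
  intro fuel
  induction fuel with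
  | zero => intro l _; rfl
  | succ f ih =>
    intro l h
    simp only [retangoLoop]
    by_cases hm : PySem.Int.mod A l = 0
    · rw [if_pos hm]
      by_cases hc : 2*l + 2*(PySem.Int.floordiv A l) - 4 = azul ∧
          l*(PySem.Int.floordiv A l) - 2*l - 2*(PySem.Int.floordiv A l) + 4 = branco
      · exact absurd ⟨hm, hc.1, hc.2⟩ (h l (le_refl l) (by push_cast; omega))
      · rw [if_neg hc]
        exact ih (l+1) (fun j hj1 hj2 => h j (by omega) (by push_cast at hj2 ⊢; omega))
    · rw [if_neg hm]
      exact ih (l+1) (fun j hj1 hj2 => h j (by omega) (by push_cast at hj2 ⊢; omega))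

lemma loop_some (azul branco A : Int) (v : List Int) :
    ∀ (fuel : Nat) (l : Int),
      (∃ j, l ≤ j ∧ j < l + fuel ∧ goodCond azul branco A j) →
      (∀ j, goodCond azul branco A j →
        [min (PySem.Int.floordiv A j) j, max j (PySem.Int.floordiv A j)] = v) →
      retangoLoop azul branco A fuel l = v := by
  intro fuel
  induction fuel with
  | zero =>
    intro l ⟨j, h1, h2, _⟩ _
    exfalso; push_cast at h2; omega
  | succ f ih =>
    intro l ⟨j, hj1, hj2, hjg⟩ hv
    simp only [retangoLoop]
    by_cases hm : PySem.Int.mod A l = 0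
    · rw [if_pos hm]
      by_cases hc : 2*l + 2*(PySem.Int.floordiv A l) - 4 = azul ∧
          l*(PySem.Int.floordiv A l) - 2*l - 2*(PySem.Int.floordiv A l) + 4 = branco
      · rw [if_pos hc]
        exact hv l ⟨hm, hc.1, hc.2⟩
      · rw [if_neg hc]
        refine ih (l+1) ⟨j, ?_, by push_cast at hj2 ⊢; omega, hjg⟩ hv
        rcases eq_or_lt_of_le hj1 with h | h
        · subst h; exact absurd ⟨hjg.2.1, hjg.2.2⟩ hc
        · omega
    · rw [if_neg hm]
      refine ih (l+1) ⟨j, ?_, by push_cast at hj2 ⊢; omega, hjg⟩ hv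
      rcases eq_or_lt_of_le hj1 with h | h
      · subst h; exact absurd hjg.1 hm
      · omega

-- invariant of the binary-search square-root loop
lemma isqrtLoop_spec (n : Int) :
    ∀ (fuel : Nat) (lo hi : Int), 0 ≤ lo → lo ≤ hi →
      lo * lo ≤ n → n < (hi + 1) * (hi + 1) → (hi - lo).toNat ≤ fuel →
      0 ≤ isqrtLoop n fuel lo hi ∧ isqrtLoop n fuel lo hi * isqrtLoop n fuel lo hi ≤ n ∧
        n < (isqrtLoop n fuel lo hi + 1) * (isqrtLoop n fuel lo hi + 1) := by
  intro fuel
  induction fuel with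
  | zero =>
    intro lo hi h0 hle hlo hhi hf
    have : lo = hi := by omega
    subst this
    simpa [isqrtLoop] using ⟨h0, hlo, hhi⟩
  | succ f ih =>
    intro lo hi h0 hle hlo hhi hf
    simp only [isqrtLoop]
    by_cases hlt : lo < hi
    · rw [if_pos hlt]
      have hmid : PySem.Int.floordiv (lo + hi + 1) 2 = (lo + hi + 1) / 2 :=
        PySem.Int.floordiv_eq_ediv_of_pos (by omega)
      have hb1 : lo < PySem.Int.floordiv (lo + hi + 1) 2 := by rw [hmid]; omega
      have hb2 : PySem.Int.floordiv (lo + hi + 1) 2 ≤ hi := by rw [hmid]; omega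
      by_cases hsq : PySem.Int.floordiv (lo + hi + 1) 2 * PySem.Int.floordiv (lo + hi + 1) 2 ≤ n
      · rw [if_pos hsq]
        exact ih _ hi (by omega) hb2 hsq hhi (by omega)
      · rw [if_neg hsq]
        exact ih lo _ h0 (by omega) hlo (by nlinarith [not_le.mp hsq]) (by omega)
    · rw [if_neg hlt]
      have : lo = hi := by omega
      subst this
      exact ⟨h0, hlo, hhi⟩

lemma pyIsqrt_spec (n : Int) (hn : 0 ≤ n) :
    0 ≤ pyIsqrt n ∧ pyIsqrt n * pyIsqrt n ≤ n ∧ n < (pyIsqrt n + 1) * (pyIsqrt n + 1) := by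
  unfold pyIsqrt
  exact isqrtLoop_spec n n.toNat 0 n (le_refl 0) hn (by simpa using hn) (by nlinarith) (by omega)

lemma pyIsqrt_sq (k : Int) (hk : 0 ≤ k) : pyIsqrt (k * k) = k := by
  obtain ⟨h0, h1, h2⟩ := pyIsqrt_spec (k * k) (by positivity)
  nlinarith

-- from A's return condition: the pair multiplies to A = azul+branco and sums to (azul+4)/2 (times 2)
lemma good_facts (azul branco A j : Int) (hA : A = azul + branco)
    (hg : goodCond azul branco A j) :
    j * (PySem.Int.floordiv A j) = A ∧ 2 * (j + PySem.Int.floordiv A j) = azul + 4 := by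
  obtain ⟨_, h1, h2⟩ := hg
  constructor <;> nlinarith

-- ===== VERDICT (by name: the statement is the Claim_ definition above) =====
theorem retangulizar_spec : Claim_equal_retangulizar := by
  intro azul branco _
  unfold Spec_retangulizar retangulizar
  simp only [retangulizar_alt]
  set A := azul + branco with hA
  by_cases h1 : A < 2 ∨ PySem.Int.mod (azul + 4) 2 ≠ 0
  · rw [if_pos h1]
    refine loop_none azul branco A _ 1 (fun j hj1 hj2 hg => ?_)
    obtain ⟨hp, hs⟩ := good_facts azul branco A j hA hg
    have h2dvd : PySem.Int.mod (azul + 4) 2 = 0 := by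
      rw [PySem.Int.mod_eq_zero_iff_dvd]; exact ⟨_, hs.symm⟩
    rcases h1 with hA2 | hpar
    · push_cast at hj2; omega
    · exact hpar h2dvd
  · rw [if_neg h1]
    have hA2 : 2 ≤ A := by by_contra h; exact h1 (Or.inl (by omega))
    have hpar : PySem.Int.mod (azul + 4) 2 = 0 := by
      by_contra h; exact h1 (Or.inr h)
    have hs2 : 2 * PySem.Int.floordiv (azul + 4) 2 = azul + 4 := by
      have := PySem.Int.floordiv_mul_add_mod (azul + 4) 2
      omega
    set s := PySem.Int.floordiv (azul + 4) 2 with hsdef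
    -- common consequences of a good j
    have key : ∀ j, goodCond azul branco A j →
        j * (PySem.Int.floordiv A j) = A ∧ j + PySem.Int.floordiv A j = s := by
      intro j hg
      obtain ⟨hp, hsum⟩ := good_facts azul branco A j hA hg
      exact ⟨hp, by omega⟩
    by_cases h2 : s * s - 4 * A < 0
    · rw [if_pos h2]
      refine loop_none azul branco A _ 1 (fun j hj1 hj2 hg => ?_)
      obtain ⟨hp, hsum⟩ := key j hg
      set c := PySem.Int.floordiv A j with hcdef
      have hd : (j - c) * (j - c) = s * s - 4 * A := by
        linear_combination (j + c + s) * hsum - 4 * hp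
      linarith [mul_self_nonneg (j - c)]
    · rw [if_neg h2]
      push_cast at h2
      rw [not_lt] at h2
      obtain ⟨hr0, hr1, hr2⟩ := pyIsqrt_spec (s * s - 4 * A) h2
      set r := pyIsqrt (s * s - 4 * A) with hrdef
      have hrabs : ∀ j, goodCond azul branco A j → r = |j - PySem.Int.floordiv A j| := by
        intro j hg
        obtain ⟨hp, hsum⟩ := key j hg
        set c := PySem.Int.floordiv A j with hcdef
        have hd : (j - c) * (j - c) = s * s - 4 * A := by
          linear_combination (j + c + s) * hsum - 4 * hp
        have habs : |j - c| * |j - c| = s * s - 4 * A := by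
          rw [abs_mul_abs_self]; exact hd
        rw [hrdef, ← habs]; exact pyIsqrt_sq _ (abs_nonneg _)
      by_cases h3 : r * r ≠ s * s - 4 * A
      · rw [if_pos h3]
        refine loop_none azul branco A _ 1 (fun j hj1 hj2 hg => ?_)
        obtain ⟨hp, hsum⟩ := key j hg
        have hreq := hrabs j hg
        have hd : (j - PySem.Int.floordiv A j) * (j - PySem.Int.floordiv A j) = s * s - 4 * A := by
          linear_combination (j + (PySem.Int.floordiv A j) + s) * hsum - 4 * hp
        exact h3 (by rw [hreq, abs_mul_abs_self]; exact hd)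
      · rw [if_neg h3]
        rw [not_ne_iff] at h3
        by_cases h4 : PySem.Int.mod (s - r) 2 ≠ 0 ∨ PySem.Int.floordiv (s - r) 2 < 1
        · rw [if_pos h4]
          refine loop_none azul branco A _ 1 (fun j hj1 hj2 hg => ?_)
          obtain ⟨hp, hsum⟩ := key j hg
          have hrj := hrabs j hg
          set c := PySem.Int.floordiv A j with hcdef
          have hj1' : (1:Int) ≤ j := hj1
          have hc1 : 1 ≤ c := by
            by_contra hcon
            have : j * c ≤ 0 := mul_nonpos_iff.mpr (Or.inl ⟨by omega, by omega⟩)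
            linarith
          have hsr : s - r = 2 * min j c := by
            rcases abs_cases (j - c) with ⟨he, hsg⟩ | ⟨he, hsg⟩ <;>
              · have hr' := hrj.trans he
                omega
          have hmod : PySem.Int.mod (s - r) 2 = 0 := by
            rw [PySem.Int.mod_eq_zero_iff_dvd]; exact ⟨min j c, hsr⟩
          have hfd : PySem.Int.floordiv (s - r) 2 = min j c := by
            rw [hsr, PySem.Int.floordiv_eq_ediv_of_pos (by omega : (0:Int) < 2)]
            omega
          rcases h4 with h4a | h4b
          · exact h4a hmod
          · rw [hfd] at h4b; omega
        · rw [if_neg h4]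
          rw [not_or, not_ne_iff, not_lt] at h4
          obtain ⟨h4a, h4b⟩ := h4
          set l1 := PySem.Int.floordiv (s - r) 2 with hl1def
          have h2l1 : 2 * l1 = s - r := by
            have := PySem.Int.floordiv_mul_add_mod (s - r) 2
            omega
          have hr_eq : r = s - 2 * l1 := by omega
          have hl1l2 : l1 * (s - l1) = A := by
            have h4x : 4 * (l1 * (s - l1)) = 4 * A := by
              rw [hr_eq] at h3; linear_combination -h3
            linarith
          have hl2ge : l1 ≤ s - l1 := by omega
          -- l1 is a good index inside the window [1, A)
          have hgood : goodCond azul branco A l1 := by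
            have hfd : PySem.Int.floordiv A l1 = s - l1 := by
              rw [PySem.Int.floordiv_eq_ediv_of_pos (by omega : (0:Int) < l1), ← hl1l2,
                Int.mul_ediv_cancel_left _ (by omega : l1 ≠ 0)]
            refine ⟨by rw [PySem.Int.mod_eq_zero_iff_dvd]; exact ⟨s - l1, hl1l2.symm⟩, ?_, ?_⟩ <;>
              rw [hfd] <;> linarith [hl1l2]
          have hl1lt : l1 < A := by
            have hsq : l1 * l1 ≤ A := by nlinarith [mul_le_mul_of_nonneg_left hl2ge (by omega : (0:Int) ≤ l1)]
            nlinarith [hsq]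
          refine loop_some azul branco A _ _ 1 ⟨l1, h4b, by omega, hgood⟩ ?_
          intro j hg
          obtain ⟨hp, hsum⟩ := key j hg
          set c := PySem.Int.floordiv A j with hcdef
          -- j and c are the two roots l1 and s - l1
          have hjc : j * (s - j) = A := by linear_combination hp - j * hsum
          have hroot : (j - l1) * (j - (s - l1)) = 0 := by
            linear_combination hl1l2 - hjc
          rcases mul_eq_zero.mp hroot with h | h
          · have hj : j = l1 := by omega
            have hc : c = s - l1 := by omega
            rw [hj, hc]
            have h1' : min (s - l1) l1 = l1 := by omega
            have h2' : max l1 (s - l1) = s - l1 := by omega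
            rw [h1', h2']
          · have hj : j = s - l1 := by omega
            have hc : c = l1 := by omega
            rw [hj, hc]
            have h1' : min l1 (s - l1) = l1 := by omega
            have h2' : max (s - l1) l1 = s - l1 := by omega
            rw [h1', h2']
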